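-- pv_equiv track=rewrite | github.com/joshrobertson8/leetcode26 | sliding-window/easy/3790-fruits-into-baskets-ii/2025-08-05 14.19.01 - Accepted - runtime 29ms - memory 12.3MB.py | numOfUnplacedFruits
-- ===== SOURCE A (Python) =====
-- def numOfUnplacedFruits(fruits, baskets):
--     """
--     :type fruits: List[int]
--     :type baskets: List[int]
--     :rtype: int
--     """
--     res = 0
--     idx = 0
--     n = len(baskets)
--
--     for fruit in fruits:
--         unset = 1
--
--         for j in range(n):
--
--             if fruit <= baskets[j]:
--                 unset = 0
--                 baskets[j] = 0
--                 break
--         res += unset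
--
--     return res
-- ===== SOURCE B (Python) =====
-- def _build(xs):
--     # segment tree node: (max, left, right); leaf has left is None
--     if len(xs) == 1:
--         return (xs[0], None, None)
--     mid = len(xs) // 2
--     l = _build(xs[:mid])
--     r = _build(xs[mid:])
--     return (max(l[0], r[0]), l, r)
--
--
-- def _place(fruit, t):
--     # zero out the leftmost leaf with value >= fruit; None if no such leaf
--     m, l, r = t
--     if m < fruit:
--         return None
--     if l is None:
--         return (0, None, None)
--     nl = _place(fruit, l)
--     if nl is not None:
--         return (max(nl[0], r[0]), nl, r)
--     nr = _place(fruit, r)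
--     if nr is None:
--         return None
--     return (max(l[0], nr[0]), l, nr)
--
--
-- def numOfUnplacedFruits(fruits, baskets):
--     t = _build(baskets) if baskets else None
--     res = 0
--     for fruit in fruits:
--         if t is None:
--             res += 1
--         else:
--             nt = _place(fruit, t)
--             if nt is None:
--                 res += 1
--             else:
--                 t = nt
--     return res
-- ===== Notes on version B (the rewrite author's own statement) =====
-- stated objective: faster
-- what changed: Replaced the per-fruit linear scan over baskets by a max segment tree queried for the leftmost basket with capacity >= fruit (the placed basket's value is set to 0, exactly as A does).
import Mathlib
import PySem

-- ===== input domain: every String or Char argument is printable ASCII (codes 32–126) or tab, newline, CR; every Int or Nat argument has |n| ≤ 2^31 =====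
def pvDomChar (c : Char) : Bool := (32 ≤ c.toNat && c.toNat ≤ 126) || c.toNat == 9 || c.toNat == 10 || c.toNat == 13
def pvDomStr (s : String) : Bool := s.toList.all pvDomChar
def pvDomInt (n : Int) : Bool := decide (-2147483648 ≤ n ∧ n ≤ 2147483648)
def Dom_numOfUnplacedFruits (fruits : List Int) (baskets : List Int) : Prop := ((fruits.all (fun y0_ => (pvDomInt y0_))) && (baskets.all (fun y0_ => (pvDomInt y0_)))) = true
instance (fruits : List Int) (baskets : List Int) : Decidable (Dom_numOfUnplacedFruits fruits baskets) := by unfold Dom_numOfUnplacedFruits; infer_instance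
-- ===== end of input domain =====

-- B replaces A's per-fruit linear basket scan by a max segment tree (leftmost basket with
-- capacity >= fruit, zeroed on use): asymptotically faster; equivalence is about the RETURN
-- value only (Python A zeroes entries of `baskets` in place, B does not mutate it).

-- ===== PORT A =====
-- inner `for j in range(n)` loop of A: scan baskets left to right, on the first basket with
-- fruit <= basket set it to 0 and break with unset = 0; otherwise unset stays 1.
def pvAScan (fruit : Int) : List Int → Int × List Int
  | [] => (1, [])
  | b :: rest =>
    if fruit ≤ b then (0, 0 :: rest)
    else
      let p := pvAScan fruit rest
      (p.1, b :: p.2)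

def numOfUnplacedFruits (fruits : List Int) (baskets : List Int) : Int :=
  (fruits.foldl (fun st fruit =>
      let p := pvAScan fruit st.2
      (st.1 + p.1, p.2)) ((0 : Int), baskets)).1

-- ===== PORT B =====
-- segment tree node: max of leaves, left child, right child (Source B's (m, l, r) tuples)
inductive PvTree : Type
  | leaf : Int → PvTree
  | node : Int → PvTree → PvTree → PvTree
deriving DecidableEq, Repr

def pvMax : PvTree → Int
  | .leaf v => v
  | .node m _ _ => m

def pvBuild (xs : List Int) : PvTree :=
  match xs with
  | [] => .leaf 0          -- never reached: numOfUnplacedFruits_alt guards baskets = []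
  | [x] => .leaf x
  | a :: b :: rest =>
    let ys := a :: b :: rest
    let mid := ys.length / 2
    let l := pvBuild (ys.take mid)
    let r := pvBuild (ys.drop mid)
    .node (max (pvMax l) (pvMax r)) l r
termination_by xs.length
decreasing_by
  all_goals simp [List.length_take, List.length_drop]
  all_goals omega

def pvPlace (fruit : Int) : PvTree → Option PvTree
  | .leaf v => if v < fruit then none else some (.leaf 0)
  | .node m l r =>
    if m < fruit then none
    else
      match pvPlace fruit l with
      | some l' => some (.node (max (pvMax l') (pvMax r)) l' r)
      | none =>
        match pvPlace fruit r with
        | some r' => some (.node (max (pvMax l) (pvMax r')) l r')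
        | none => none

def numOfUnplacedFruits_alt (fruits : List Int) (baskets : List Int) : Int :=
  let t0 : Option PvTree := if baskets.isEmpty then none else some (pvBuild baskets)
  (fruits.foldl (fun (st : Int × Option PvTree) fruit =>
      match st.2 with
      | none => (st.1 + 1, none)
      | some t =>
        match pvPlace fruit t with
        | none => (st.1 + 1, some t)
        | some t' => (st.1, some t')) (0, t0)).1

-- ===== PRECONDITION & SPEC =====
def Spec_numOfUnplacedFruits (fruits : List Int) (baskets : List Int) (out : Int) : Prop := out = numOfUnplacedFruits_alt fruits baskets
instance (fruits : List Int) (baskets : List Int) (out : Int) : Decidable (Spec_numOfUnplacedFruits fruits baskets out) := by unfold Spec_numOfUnplacedFruits; infer_instance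

-- ===== CLAIM (what is proved, stated in full; the proofs are below) =====
def Claim_equal_numOfUnplacedFruits : Prop := ∀ (fruits : List Int) (baskets : List Int), Dom_numOfUnplacedFruits fruits baskets → Spec_numOfUnplacedFruits fruits baskets (numOfUnplacedFruits fruits baskets)

-- ===== LEMMAS AND PROOFS =====

-- fringe of the tree (the basket list it represents)
def pvToL : PvTree → List Int
  | .leaf v => [v]
  | .node _ l r => pvToL l ++ pvToL r

-- well-formedness: every node's value is the max of its children's values
def pvInv : PvTree → Prop
  | .leaf _ => True
  | .node m l r => pvInv l ∧ pvInv r ∧ m = max (pvMax l) (pvMax r)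

theorem pvMem_le_max (t : PvTree) (h : pvInv t) : ∀ x ∈ pvToL t, x ≤ pvMax t := by
  induction t with
  | leaf v => simp [pvToL, pvMax]
  | node m l r ihl ihr =>
    obtain ⟨hl, hr, hm⟩ := h
    intro x hx
    simp only [pvToL, List.mem_append] at hx
    rcases hx with hx | hx
    · exact le_trans (ihl hl x hx) (hm ▸ le_max_left _ _)
    · exact le_trans (ihr hr x hx) (hm ▸ le_max_right _ _)

theorem pvAScan_all_lt (f : Int) (l : List Int) (h : ∀ x ∈ l, x < f) :
    pvAScan f l = (1, l) := by
  induction l with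
  | nil => rfl
  | cons b rest ih =>
    have hb : b < f := h b (by simp)
    simp only [pvAScan, if_neg (by omega : ¬ f ≤ b)]
    rw [ih (fun x hx => h x (by simp [hx]))]

theorem pvAScan_append (f : Int) (l1 l2 : List Int) :
    pvAScan f (l1 ++ l2) =
      if (pvAScan f l1).1 = 0 then (0, (pvAScan f l1).2 ++ l2)
      else ((pvAScan f l2).1, l1 ++ (pvAScan f l2).2) := by
  induction l1 with
  | nil => simp [pvAScan]
  | cons b rest ih =>
    by_cases hb : f ≤ b
    · simp [pvAScan, hb]
    · simp only [List.cons_append, pvAScan, if_neg hb, ih]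
      by_cases h0 : (pvAScan f rest).1 = 0 <;> simp [h0]

theorem pvPlace_inv (f : Int) (t : PvTree) (h : pvInv t) :
    ∀ t', pvPlace f t = some t' → pvInv t' := by
  induction t with
  | leaf v =>
    intro t' ht'
    simp only [pvPlace] at ht'
    split at ht'
    · exact absurd ht' (by simp)
    · injection ht' with hh; subst hh; trivial
  | node m l r ihl ihr =>
    obtain ⟨hl, hr, _⟩ := h
    intro t' ht'
    simp only [pvPlace] at ht'
    split at ht'
    · exact absurd ht' (by simp)
    · split at ht'
      · rename_i l' hpl
        cases ht'
        exact ⟨ihl hl l' hpl, hr, rfl⟩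
      · split at ht'
        · rename_i r' hpr
          cases ht'
          exact ⟨hl, ihr hr r' hpr, rfl⟩
        · exact absurd ht' (by simp)

-- the key correspondence: one segment-tree placement equals one linear scan of the fringe
theorem pvPlace_scan (f : Int) (t : PvTree) (h : pvInv t) :
    pvAScan f (pvToL t) =
      (match pvPlace f t with
       | none => (1, pvToL t)
       | some t' => (0, pvToL t')) := by
  induction t with
  | leaf v =>
    simp only [pvToL, pvPlace, pvAScan]
    by_cases hv : v < f
    · simp [hv, show ¬ f ≤ v by omega]
    · simp [hv, show f ≤ v by omega, pvToL]
  | node m l r ihl ihr =>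
    obtain ⟨hl, hr, hm⟩ := h
    simp only [pvToL, pvPlace]
    by_cases hmf : m < f
    · rw [if_pos hmf]
      have : ∀ x ∈ pvToL l ++ pvToL r, x < f := by
        intro x hx
        have := pvMem_le_max (.node m l r) ⟨hl, hr, hm⟩ x (by simpa [pvToL] using hx)
        simpa [pvMax] using lt_of_le_of_lt this hmf
      simp [pvAScan_all_lt f _ this]
    · rw [if_neg hmf, pvAScan_append]
      rcases hpl : pvPlace f l with _ | l'
      · have h1 : pvAScan f (pvToL l) = (1, pvToL l) := by rw [ihl hl, hpl]
        rw [h1, if_neg (by simp)]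
        rcases hpr : pvPlace f r with _ | r'
        · have h2 : pvAScan f (pvToL r) = (1, pvToL r) := by rw [ihr hr, hpr]
          simp [h2]
        · have h2 : pvAScan f (pvToL r) = (0, pvToL r') := by rw [ihr hr, hpr]
          simp [h2, pvToL]
      · have h1 : pvAScan f (pvToL l) = (0, pvToL l') := by rw [ihl hl, hpl]
        simp [h1, pvToL]

theorem pvBuild_toL (xs : List Int) (h : xs ≠ []) : pvToL (pvBuild xs) = xs := by
  induction xs using pvBuild.induct with
  | case1 => exact absurd rfl h
  | case2 x => simp [pvBuild, pvToL]
  | case3 a b rest ys mid ih1 ih2 =>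
    rw [pvBuild]
    simp only [pvToL]
    rw [ih1 (List.ne_nil_of_length_pos (by simp [ys, mid, List.length_take])),
        ih2 (List.ne_nil_of_length_pos (by simp [ys, mid, List.length_drop]; omega))]
    exact List.take_append_drop _ _

theorem pvBuild_inv (xs : List Int) : pvInv (pvBuild xs) := by
  induction xs using pvBuild.induct with
  | case1 => rw [pvBuild]; trivial
  | case2 x => rw [pvBuild]; trivial
  | case3 a b rest ys mid ih1 ih2 => rw [pvBuild]; exact ⟨ih1, ih2, rfl⟩

theorem pvFold_eq (fruits : List Int) : ∀ (res : Int) (st : Option PvTree) (bs : List Int),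
    (match st with | none => bs = [] | some t => pvInv t ∧ pvToL t = bs) →
    (fruits.foldl (fun st fruit =>
        let p := pvAScan fruit st.2
        (st.1 + p.1, p.2)) (res, bs)).1 =
    (fruits.foldl (fun (st : Int × Option PvTree) fruit =>
        match st.2 with
        | none => (st.1 + 1, none)
        | some t =>
          match pvPlace fruit t with
          | none => (st.1 + 1, some t)
          | some t' => (st.1, some t')) (res, st)).1 := by
  induction fruits with
  | nil => intro res st bs _; rfl
  | cons f rest ih =>
    intro res st bs hrel
    rcases st with _ | t
    · subst hrel
      simpa [pvAScan] using ih (res + 1) none [] rfl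
    · obtain ⟨hinv, hto⟩ := hrel
      have hscan := pvPlace_scan f t hinv
      rcases hp : pvPlace f t with _ | t'
      · rw [hp] at hscan
        simp only [List.foldl_cons, ← hto, hscan, hp]
        exact ih (res + 1) (some t) (pvToL t) ⟨hinv, rfl⟩
      · rw [hp] at hscan
        simp only [List.foldl_cons, ← hto, hscan, hp]
        have : res + 0 = res := by omega
        rw [this]
        exact ih res (some t') (pvToL t') ⟨pvPlace_inv f t hinv t' hp, rfl⟩

-- ===== VERDICT (by name: the statement is the Claim_ definition above) =====
theorem numOfUnplacedFruits_spec : Claim_equal_numOfUnplacedFruits := by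
  intro fruits baskets _
  unfold Spec_numOfUnplacedFruits numOfUnplacedFruits numOfUnplacedFruits_alt
  by_cases hb : baskets.isEmpty
  · rw [if_pos hb]
    exact pvFold_eq fruits 0 none baskets (by simpa [List.isEmpty_iff] using hb)
  · rw [if_neg hb]
    have hne : baskets ≠ [] := by simpa [List.isEmpty_iff] using hb
    exact pvFold_eq fruits 0 (some (pvBuild baskets)) baskets
      ⟨pvBuild_inv baskets, pvBuild_toL baskets hne⟩
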